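-- pv_equiv track=rewrite | github.com/Hita4i/beetroot | IteratorsAndGenerators/task2.py | in_range
-- ===== SOURCE A (Python) =====
-- def in_range(start: int, stop: int = None, step: int = 1):
--     if step == 0:
--         raise Exception('Step can\'t be 0')
--     if stop is None:
--         new_start = start
--         start = 0
--         stop = new_start
--     if step > 0:
--         while start <= stop - 1:
--             yield start
--             start += step
--     else:
--         while start >= stop + 1:
--             yield start
--             start += step
-- ===== SOURCE B (Python) =====
-- def in_range(start: int, stop: int = None, step: int = 1):
--     if step == 0:
--         raise Exception('Step can\'t be 0')
--     if stop is None: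
--         start, stop = 0, start
--     count = max(0, -((start - stop) // step))
--     for i in range(count):
--         yield start + i * step
-- ===== Notes on version B (the rewrite author's own statement) =====
-- stated objective: alternative
-- what changed: Replaces A's incremental while-loops (compare, yield, add step, repeat) by computing the element count once with one floor-division formula uniform in the step's sign and yielding start + i*step in a counted indexed loop.
import Mathlib
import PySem

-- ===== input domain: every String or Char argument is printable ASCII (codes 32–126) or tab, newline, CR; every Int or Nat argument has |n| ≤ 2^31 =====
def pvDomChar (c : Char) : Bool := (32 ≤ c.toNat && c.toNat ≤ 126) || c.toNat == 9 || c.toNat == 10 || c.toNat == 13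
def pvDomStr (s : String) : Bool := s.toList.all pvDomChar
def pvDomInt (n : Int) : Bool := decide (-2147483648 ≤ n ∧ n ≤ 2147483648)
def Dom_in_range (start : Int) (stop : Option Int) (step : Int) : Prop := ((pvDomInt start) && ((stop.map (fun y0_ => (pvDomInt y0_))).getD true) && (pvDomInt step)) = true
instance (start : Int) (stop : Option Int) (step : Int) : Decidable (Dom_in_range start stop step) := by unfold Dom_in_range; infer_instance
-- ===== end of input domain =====

-- B replaces A's incremental while-loops by one closed-form element count and an indexed map; A's generator is ported as the list of yielded values.

-- ===== PORT A =====
-- A's ascending while-loop: `while start <= stop - 1: yield start; start += step` (invoked with 0 < step;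
-- the `0 < step` in the guard is a totality guard only — it holds at every call site inside Pre_).
def inRangeUp (start stop step : Int) : List Int :=
  if _h : start ≤ stop - 1 ∧ 0 < step then
    start :: inRangeUp (start + step) stop step
  else []
termination_by (stop - start).toNat
decreasing_by omega

-- A's descending while-loop: `while start >= stop + 1: yield start; start += step` (invoked with step < 0).
def inRangeDown (start stop step : Int) : List Int :=
  if _h : start ≥ stop + 1 ∧ step < 0 then
    start :: inRangeDown (start + step) stop step
  else []
termination_by (start - stop).toNat
decreasing_by omega

def in_range (start : Int) (stop : Option Int) (step : Int) : List Int :=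
  -- `if step == 0: raise` is excluded by Pre_in_range
  let p : Int × Int := match stop with
    | none => (0, start)        -- stop is None: start, stop = 0, start
    | some s => (start, s)
  if 0 < step then inRangeUp p.1 p.2 step else inRangeDown p.1 p.2 step

-- ===== PORT B =====
def in_range_alt (start : Int) (stop : Option Int) (step : Int) : List Int :=
  -- `if step == 0: raise` is excluded by Pre_in_range
  let p : Int × Int := match stop with
    | none => (0, start)        -- stop is None: start, stop = 0, start
    | some s => (start, s)
  let count : Int := max 0 (-(PySem.Int.floordiv (p.1 - p.2) step))
  (List.range count.toNat).map (fun i : Nat => p.1 + (i : Int) * step)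

-- ===== PRECONDITION & SPEC =====
-- Pre_ excludes exactly step = 0, where Python A raises Exception("Step can't be 0").
def Pre_in_range (start : Int) (stop : Option Int) (step : Int) : Prop := step ≠ 0
instance (start : Int) (stop : Option Int) (step : Int) : Decidable (Pre_in_range start stop step) := by unfold Pre_in_range; infer_instance
def pvWitness_in_range : Int × Option Int × Int := (1, some 10, 2)

def Spec_in_range (start : Int) (stop : Option Int) (step : Int) (out : List Int) : Prop := out = in_range_alt start stop step
instance (start : Int) (stop : Option Int) (step : Int) (out : List Int) : Decidable (Spec_in_range start stop step out) := by unfold Spec_in_range; infer_instance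

-- ===== CLAIM (what is proved, stated in full; the proofs are below) =====
def Claim_equal_in_range : Prop := ∀ (start : Int) (stop : Option Int) (step : Int), Dom_in_range start stop step → Pre_in_range start stop step → Spec_in_range start stop step (in_range start stop step)

-- ===== LEMMAS AND PROOFS =====

-- fdiv by a positive divisor is ediv.
theorem fdiv_eq_ediv_of_nonneg (a b : Int) (h : 0 ≤ b) : Int.fdiv a b = a / b := by
  rw [Int.fdiv_eq_ediv]; simp [h]

-- for 0 < t : 0 ≤ fdiv x t ↔ 0 ≤ x
theorem fdiv_nonneg_iff (x t : Int) (ht : 0 < t) : 0 ≤ Int.fdiv x t ↔ 0 ≤ x := by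
  rw [fdiv_eq_ediv_of_nonneg x t (le_of_lt ht)]
  constructor
  · intro h
    by_contra hx
    have hlt : x / t < 0 := Int.ediv_neg_of_neg_of_pos (by omega) ht
    omega
  · intro h; exact Int.ediv_nonneg h (le_of_lt ht)

-- the count drops by one after one loop step
theorem fdiv_shift (x t : Int) (ht : t ≠ 0) : Int.fdiv (x + t) t = Int.fdiv x t + 1 := by
  have := Int.add_mul_fdiv_right x 1 ht
  simpa using this

-- ascending loop equals the counted map
theorem up_eq (n : Nat) : ∀ (a b s : Int), 0 < s →
    (max 0 (-(Int.fdiv (a - b) s))).toNat = n →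
    inRangeUp a b s = (List.range n).map (fun i : Nat => a + (i : Int) * s) := by
  induction n with
  | zero =>
    intro a b s hs hn
    have h0 : 0 ≤ Int.fdiv (a - b) s := by omega
    have : 0 ≤ a - b := (fdiv_nonneg_iff _ _ hs).mp h0
    rw [inRangeUp, dif_neg (by omega)]
    simp
  | succ n ih =>
    intro a b s hs hn
    have h0 : Int.fdiv (a - b) s ≤ -1 := by omega
    have hneg : a - b < 0 := by
      by_contra h
      have := (fdiv_nonneg_iff (a - b) s hs).mpr (by omega)
      omega
    have hshift : Int.fdiv (a + s - b) s = Int.fdiv (a - b) s + 1 := by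
      have := fdiv_shift (a - b) s (by omega)
      rw [show a + s - b = a - b + s by ring, this]
    rw [inRangeUp, dif_pos ⟨by omega, hs⟩]
    rw [ih (a + s) b s hs (by omega)]
    rw [List.range_succ_eq_map]
    simp only [List.map_cons, List.map_map]
    refine congrArg₂ List.cons (by simp) ?_
    refine List.map_congr_left fun i _ => ?_
    simp only [Function.comp]
    push_cast
    ring

-- descending loop equals the counted map
theorem down_eq (n : Nat) : ∀ (a b s : Int), s < 0 →
    (max 0 (-(Int.fdiv (a - b) s))).toNat = n →
    inRangeDown a b s = (List.range n).map (fun i : Nat => a + (i : Int) * s) := by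
  induction n with
  | zero =>
    intro a b s hs hn
    have hflip : Int.fdiv (a - b) s = Int.fdiv (b - a) (-s) := by
      rw [← Int.neg_fdiv_neg]; ring_nf
    have h0 : 0 ≤ Int.fdiv (b - a) (-s) := by omega
    have : 0 ≤ b - a := (fdiv_nonneg_iff _ _ (by omega)).mp h0
    rw [inRangeDown, dif_neg (by omega)]
    simp
  | succ n ih =>
    intro a b s hs hn
    have hflip : Int.fdiv (a - b) s = Int.fdiv (b - a) (-s) := by
      rw [← Int.neg_fdiv_neg]; ring_nf
    have h0 : Int.fdiv (b - a) (-s) ≤ -1 := by omega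
    have hneg : b - a < 0 := by
      by_contra h
      have := (fdiv_nonneg_iff (b - a) (-s) (by omega)).mpr (by omega)
      omega
    have hshift : Int.fdiv (a + s - b) s = Int.fdiv (a - b) s + 1 := by
      have := fdiv_shift (a - b) s (by omega)
      rw [show a + s - b = a - b + s by ring, this]
    have hflip2 : Int.fdiv (a + s - b) s = Int.fdiv (b - (a + s)) (-s) := by
      rw [← Int.neg_fdiv_neg]; ring_nf
    rw [inRangeDown, dif_pos ⟨by omega, hs⟩]
    rw [ih (a + s) b s hs (by omega)]
    rw [List.range_succ_eq_map]
    simp only [List.map_cons, List.map_map]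
    refine congrArg₂ List.cons (by simp) ?_
    refine List.map_congr_left fun i _ => ?_
    simp only [Function.comp]
    push_cast
    ring

-- ===== VERDICT (by name: the statement is the Claim_ definition above) =====
theorem in_range_spec : Claim_equal_in_range := by
  intro start stop step _ hpre
  unfold Spec_in_range in_range in_range_alt
  rcases stop with _ | b <;>
  · simp only
    rcases lt_trichotomy step 0 with hs | hs | hs
    · rw [if_neg (by omega)]
      exact down_eq _ _ _ _ hs rfl
    · exact absurd hs hpre
    · rw [if_pos hs]
      exact up_eq _ _ _ _ hs rfl
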